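-- pv_equiv track=rewrite | github.com/Jrkrish/SDLC-Agents | src/dev_pilot/connectors/agent_connector_bridge.py | _parse_code_into_files
-- ===== SOURCE A (Python) =====
-- from typing import Dict, Any, List, Optional, Union
--
-- def _parse_code_into_files(code_generated: str) -> List[Dict[str, str]]:
--     """Parse generated code into individual files"""
--     files = []
--     current_file = None
--     current_content = []
--
--     lines = code_generated.split('\n')
--
--     for line in lines:
--         if line.strip().startswith('# File:') or line.strip().startswith('##'):
--             # Save previous file
--             if current_file and current_content:
--                 files.append({
--                     "path": current_file,
--                     "content": '\n'.join(current_content)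
--                 })
--
--             # Start new file
--             current_file = line.replace('# File:', '').replace('##', '').strip()
--             current_content = []
--         else:
--             current_content.append(line)
--
--     # Save last file
--     if current_file and current_content:
--         files.append({
--             "path": current_file,
--             "content": '\n'.join(current_content)
--         })
--
--     # If no files detected, create a default main.py
--     if not files and code_generated.strip():
--         files.append({
--             "path": "main.py",
--             "content": code_generated
--         })
--
--     return files
-- ===== SOURCE B (Python) =====
-- def _parse_code_into_files(code_generated: str):
--     """Two-pass: segment the lines at marker lines, then build file dicts."""
--     lines = code_generated.split('\n')
--
--     # Pass 1: partition into segments (header_line, body_lines); lines before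
--     # the first marker go into a headerless preamble that is never emitted.
--     segments = []
--     preamble = []
--     for line in lines:
--         stripped = line.strip()
--         if stripped.startswith('# File:') or stripped.startswith('##'):
--             segments.append((line, []))
--         elif segments:
--             segments[-1][1].append(line)
--         else:
--             preamble.append(line)
--
--     # Pass 2: derive names and keep only segments with a name and a body.
--     files = []
--     for header, body in segments:
--         name = header.replace('# File:', '').replace('##', '').strip()
--         if name and body:
--             files.append({"path": name, "content": '\n'.join(body)})
--
--     if not files and code_generated.strip():
--         files.append({"path": "main.py", "content": code_generated})
--     return files
-- ===== Notes on version B (the rewrite author's own statement) =====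
-- stated objective: alternative
-- what changed: A's single fold over lines with a three-variable running state (files, current_file, current_content) and duplicated save-blocks is replaced by a two-pass decomposition: first partition the lines into (header, body) segments at marker lines, then build the file dicts from the segments, with the same empty-name/empty-body skipping and default main.py fallback.
import Mathlib
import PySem

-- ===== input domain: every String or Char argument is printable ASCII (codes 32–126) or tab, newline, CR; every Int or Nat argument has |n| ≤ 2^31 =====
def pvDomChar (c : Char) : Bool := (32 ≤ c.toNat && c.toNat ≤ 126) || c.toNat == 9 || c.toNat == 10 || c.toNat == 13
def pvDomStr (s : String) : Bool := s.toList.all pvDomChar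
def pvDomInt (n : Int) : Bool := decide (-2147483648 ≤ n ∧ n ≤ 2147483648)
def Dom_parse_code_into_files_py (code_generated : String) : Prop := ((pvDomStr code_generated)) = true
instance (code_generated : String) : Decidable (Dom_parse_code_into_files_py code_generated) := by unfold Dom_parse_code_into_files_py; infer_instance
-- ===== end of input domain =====

-- B replaces A's three-variable state machine by a two-pass decomposition
-- (segment the lines at markers, then build the file dicts); objective: alternative.

-- shared helpers: both Pythons contain these exact expressions
def pvIsMarker (line : String) : Bool :=
  PySem.Str.startswith (PySem.Str.strip line) "# File:" ||
  PySem.Str.startswith (PySem.Str.strip line) "##"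

def pvName (line : String) : String :=
  PySem.Str.strip (PySem.Str.replace (PySem.Str.replace line "# File:" "") "##" "")

def pvEntry (f : String) (content : List String) : List (String × String) :=
  [("path", f), ("content", PySem.Str.join "\n" content)]

-- ===== PORT A =====
-- the "save previous file" block, which appears twice in A
def pvFlushA (st : List (List (String × String)) × Option String × List String) :
    List (List (String × String)) :=
  match st with
  | (files, none, _) => files
  | (files, some f, content) =>
      if f ≠ "" ∧ content ≠ [] then files ++ [pvEntry f content] else files

def pvStepA (st : List (List (String × String)) × Option String × List String)
    (line : String) : List (List (String × String)) × Option String × List String :=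
  if pvIsMarker line then (pvFlushA st, some (pvName line), [])
  else (st.1, st.2.1, st.2.2 ++ [line])

def parse_code_into_files_py (code_generated : String) : List (List (String × String)) :=
  let lines := (PySem.Str.split? code_generated "\n").getD []  -- sep "\n" ≠ "", so split? is always some
  let files := pvFlushA (lines.foldl pvStepA ([], none, []))
  if files = [] ∧ PySem.Str.strip code_generated ≠ "" then
    [[("path", "main.py"), ("content", code_generated)]]
  else files

-- ===== PORT B =====
-- segments[-1][1].append(line)
def pvAddToLast : List (String × List String) → String → List (String × List String)
  | [], _ => []
  | [sb], l => [(sb.1, sb.2 ++ [l])]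
  | s :: t :: rest, l => s :: pvAddToLast (t :: rest) l

-- pass 1 step: (segments, preamble)
def pvStepB (st : List (String × List String) × List String) (line : String) :
    List (String × List String) × List String :=
  if pvIsMarker line then (st.1 ++ [(line, [])], st.2)
  else if st.1 ≠ [] then (pvAddToLast st.1 line, st.2)
  else (st.1, st.2 ++ [line])

-- pass 2: keep segments with non-empty name and body
def pvBuild (segs : List (String × List String)) : List (List (String × String)) :=
  segs.foldl
    (fun files sb =>
      if pvName sb.1 ≠ "" ∧ sb.2 ≠ [] then files ++ [pvEntry (pvName sb.1) sb.2] else files) []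

def parse_code_into_files_py_alt (code_generated : String) : List (List (String × String)) :=
  let lines := (PySem.Str.split? code_generated "\n").getD []  -- sep "\n" ≠ "", so split? is always some
  let segs := (lines.foldl pvStepB ([], [])).1
  let files := pvBuild segs
  if files = [] ∧ PySem.Str.strip code_generated ≠ "" then
    [[("path", "main.py"), ("content", code_generated)]]
  else files

-- ===== PRECONDITION & SPEC =====
def Spec_parse_code_into_files_py (code_generated : String) (out : List (List (String × String))) : Prop := out = parse_code_into_files_py_alt code_generated
instance (code_generated : String) (out : List (List (String × String))) : Decidable (Spec_parse_code_into_files_py code_generated out) := by unfold Spec_parse_code_into_files_py; infer_instance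

-- ===== CLAIM (what is proved, stated in full; the proofs are below) =====
def Claim_equal_parse_code_into_files_py : Prop := ∀ (code_generated : String), Dom_parse_code_into_files_py code_generated → Spec_parse_code_into_files_py code_generated (parse_code_into_files_py code_generated)

-- ===== LEMMAS AND PROOFS =====

-- proof-only reference segmentation, built back-to-front: (segments, preamble)
def pvSegs : List String → List (String × List String) × List String
  | [] => ([], [])
  | l :: rest =>
      let (ss, pre) := pvSegs rest
      if pvIsMarker l then ((l, pre) :: ss, []) else (ss, l :: pre)

def pvEnt (f : String) (c : List String) : List (List (String × String)) :=
  if f ≠ "" ∧ c ≠ [] then [pvEntry f c] else []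

def pvBFM (ss : List (String × List String)) : List (List (String × String)) :=
  ss.flatMap (fun sb => pvEnt (pvName sb.1) sb.2)

theorem pvAddToLast_append (ss : List (String × List String)) (h : String)
    (b : List String) (l : String) :
    pvAddToLast (ss ++ [(h, b)]) l = ss ++ [(h, b ++ [l])] := by
  induction ss with
  | nil => simp [pvAddToLast]
  | cons s rest ih =>
      cases hr : rest ++ [(h, b)] with
      | nil => simp at hr
      | cons t rest' =>
          rw [List.cons_append, hr]
          show s :: pvAddToLast (t :: rest') l = _
          rw [← hr, ih]
          simp

theorem pvBuild_gen (ss : List (String × List String))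
    (acc : List (List (String × String))) :
    ss.foldl
      (fun files sb =>
        if pvName sb.1 ≠ "" ∧ sb.2 ≠ [] then files ++ [pvEntry (pvName sb.1) sb.2] else files)
      acc = acc ++ pvBFM ss := by
  induction ss generalizing acc with
  | nil => simp [pvBFM]
  | cons sb rest ih =>
      rw [List.foldl_cons, ih]
      by_cases hc : pvName sb.1 ≠ "" ∧ sb.2 ≠ []
      · rw [if_pos hc]; simp [pvBFM, pvEnt, hc]
      · rw [if_neg hc]; simp [pvBFM, pvEnt, hc]

theorem pvBuild_eq (ss : List (String × List String)) : pvBuild ss = pvBFM ss := by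
  simpa [pvBuild] using pvBuild_gen ss []

theorem pvFoldB_some (lines : List String) : ∀ (ss : List (String × List String))
    (h : String) (b : List String) (pre : List String),
    (lines.foldl pvStepB (ss ++ [(h, b)], pre)).1 =
      ss ++ [(h, b ++ (pvSegs lines).2)] ++ (pvSegs lines).1 := by
  induction lines with
  | nil => intro ss h b pre; simp [pvSegs]
  | cons l rest ih =>
      intro ss h b pre
      by_cases hm : pvIsMarker l = true
      · rw [List.foldl_cons,
          show pvStepB (ss ++ [(h, b)], pre) l = ((ss ++ [(h, b)]) ++ [(l, [])], pre) from by
            simp [pvStepB, hm],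
          ih (ss ++ [(h, b)]) l [] pre]
        simp [pvSegs, hm]
      · rw [List.foldl_cons,
          show pvStepB (ss ++ [(h, b)], pre) l = (ss ++ [(h, b ++ [l])], pre) from by
            simp [pvStepB, hm, pvAddToLast_append],
          ih ss h (b ++ [l]) pre]
        simp [pvSegs, hm]

theorem pvFoldB_nil (lines : List String) : ∀ (pre : List String),
    (lines.foldl pvStepB (([] : List (String × List String)), pre)).1 = (pvSegs lines).1 := by
  induction lines with
  | nil => intro pre; simp [pvSegs]
  | cons l rest ih =>
      intro pre
      by_cases hm : pvIsMarker l = true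
      · rw [List.foldl_cons,
          show pvStepB (([] : List (String × List String)), pre) l = ([] ++ [(l, [])], pre) from by
            simp [pvStepB, hm],
          pvFoldB_some rest [] l [] pre]
        simp [pvSegs, hm]
      · rw [List.foldl_cons,
          show pvStepB (([] : List (String × List String)), pre) l = ([], pre ++ [l]) from by
            simp [pvStepB, hm],
          ih (pre ++ [l])]
        simp [pvSegs, hm]

theorem pvFoldA_some (lines : List String) : ∀ (files : List (List (String × String)))
    (f : String) (b : List String),
    pvFlushA (lines.foldl pvStepA (files, some f, b)) =
      files ++ pvEnt f (b ++ (pvSegs lines).2) ++ pvBFM (pvSegs lines).1 := by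
  induction lines with
  | nil =>
      intro files f b
      simp [pvSegs, pvFlushA, pvEnt, pvBFM]
      split_ifs <;> simp
  | cons l rest ih =>
      intro files f b
      by_cases hm : pvIsMarker l = true
      · rw [List.foldl_cons,
          show pvStepA (files, some f, b) l
              = (pvFlushA (files, some f, b), some (pvName l), []) from by simp [pvStepA, hm],
          ih (pvFlushA (files, some f, b)) (pvName l) []]
        simp [pvSegs, hm, pvFlushA, pvBFM, pvEnt]
        split_ifs <;> simp
      · rw [List.foldl_cons,
          show pvStepA (files, some f, b) l = (files, some f, b ++ [l]) from by
            simp [pvStepA, hm],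
          ih files f (b ++ [l])]
        simp [pvSegs, hm]

theorem pvFoldA_nil (lines : List String) : ∀ (files : List (List (String × String)))
    (c : List String),
    pvFlushA (lines.foldl pvStepA (files, none, c)) = files ++ pvBFM (pvSegs lines).1 := by
  induction lines with
  | nil => intro files c; simp [pvSegs, pvFlushA, pvBFM]
  | cons l rest ih =>
      intro files c
      by_cases hm : pvIsMarker l = true
      · rw [List.foldl_cons,
          show pvStepA (files, none, c) l = (files, some (pvName l), []) from by
            simp [pvStepA, hm, pvFlushA],
          pvFoldA_some rest files (pvName l) []]
        simp [pvSegs, hm, pvBFM]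
      · rw [List.foldl_cons,
          show pvStepA (files, none, c) l = (files, none, c ++ [l]) from by
            simp [pvStepA, hm],
          ih files (c ++ [l])]
        simp [pvSegs, hm]

-- ===== VERDICT (by name: the statement is the Claim_ definition above) =====
theorem parse_code_into_files_py_spec : Claim_equal_parse_code_into_files_py := by
  intro code_generated _
  unfold Spec_parse_code_into_files_py parse_code_into_files_py parse_code_into_files_py_alt
  simp only [pvFoldA_nil, pvFoldB_nil, pvBuild_eq, List.nil_append]
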